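-- pv_equiv track=rewrite | github.com/juliansweatt/machine-learning | common.py | log_labels
-- ===== SOURCE A (Python) =====
-- def log_labels(size=400):
--     labels = []
--     mid_point = size / 2
--     for i in range(size):
--         lab = 0
--         if i < mid_point:
--             labels.append(0)
--         else:
--             labels.append(1)
--     return labels
-- ===== SOURCE B (Python) =====
-- def log_labels(size=400):
--     mid = (size + 1) // 2
--     return [0] * mid + [1] * (size - mid)
-- ===== Notes on version B (the rewrite author's own statement) =====
-- stated objective: simpler
-- what changed: Computes the count of zeros arithmetically (ceiling of half the size, via integer floor division) and builds the result by list repetition, removing the per-element loop and branch.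
import Mathlib
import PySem

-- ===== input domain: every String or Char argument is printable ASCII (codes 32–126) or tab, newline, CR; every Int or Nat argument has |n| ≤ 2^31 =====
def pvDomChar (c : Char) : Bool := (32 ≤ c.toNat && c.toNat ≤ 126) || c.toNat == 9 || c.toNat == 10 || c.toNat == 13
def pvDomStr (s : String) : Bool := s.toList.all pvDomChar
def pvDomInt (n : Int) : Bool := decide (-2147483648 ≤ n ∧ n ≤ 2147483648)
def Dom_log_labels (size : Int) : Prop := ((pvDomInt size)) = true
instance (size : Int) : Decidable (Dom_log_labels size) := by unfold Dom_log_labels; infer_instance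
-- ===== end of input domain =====

-- B builds the list by repetition from the arithmetic split point mid = (size+1)//2 instead of looping over range(size): simpler, no per-element branch.

-- ===== PORT A =====
-- mid_point = size / 2 is Python float division; for an Int i with |size| ≤ 2^31
-- the comparison 'i < size/2' is exact and equals '2*i < size' (ported so; exact on Dom).
def log_labels (size : Int) : List Int :=
  (PySem.List.pyRange 0 size 1).foldl
    (fun labels i => if 2 * i < size then labels ++ [0] else labels ++ [1]) []

-- ===== PORT B =====
-- [0]*m in Python is [] for m < 0, matching Int.toNat's clamp.
def log_labels_alt (size : Int) : List Int :=
  List.replicate (PySem.Int.floordiv (size + 1) 2).toNat 0 ++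
  List.replicate (size - PySem.Int.floordiv (size + 1) 2).toNat 1

-- ===== PRECONDITION & SPEC =====
def Spec_log_labels (size : Int) (out : List Int) : Prop := out = log_labels_alt size
instance (size : Int) (out : List Int) : Decidable (Spec_log_labels size out) := by unfold Spec_log_labels; infer_instance

-- ===== CLAIM (what is proved, stated in full; the proofs are below) =====
def Claim_equal_log_labels : Prop := ∀ (size : Int), Dom_log_labels size → Spec_log_labels size (log_labels size)

-- ===== LEMMAS AND PROOFS =====

theorem log_labels_key (size mid : Int)
    (hmid : 2 * mid = size ∨ 2 * mid = size + 1) :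
    ∀ (n : Nat), (n : Int) ≤ size →
      (PySem.List.pyRange 0 (n : Int) 1).foldl
        (fun labels i => if 2 * i < size then labels ++ [0] else labels ++ [1]) ([] : List Int)
      = List.replicate (min n mid.toNat) 0 ++ List.replicate (n - mid.toNat) 1 := by
  intro n
  induction n with
  | zero => intro _; simp [PySem.List.pyRange_one_eq_nil]
  | succ k ih =>
    intro hle
    have hk : (k : Int) ≤ size := by push_cast at hle ⊢; omega
    rw [show ((k + 1 : Nat) : Int) = (k : Int) + 1 by push_cast; ring,
        PySem.List.pyRange_one_succ_right (by positivity), List.foldl_append, ih hk]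
    by_cases hlt : 2 * (k : Int) < size
    · have hkm : k < mid.toNat := by omega
      simp only [List.foldl, if_pos hlt]
      rw [show min (k + 1) mid.toNat = (min k mid.toNat) + 1 by omega,
          show (k + 1) - mid.toNat = 0 by omega,
          show k - mid.toNat = 0 by omega, List.replicate_succ']
      simp
    · have hkm : mid.toNat ≤ k := by omega
      simp only [List.foldl, if_neg hlt]
      rw [show min (k + 1) mid.toNat = min k mid.toNat by omega,
          show (k + 1) - mid.toNat = (k - mid.toNat) + 1 by omega,
          List.replicate_succ']
      simp

-- ===== VERDICT (by name: the statement is the Claim_ definition above) =====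
theorem log_labels_spec : Claim_equal_log_labels := by
  intro size _
  unfold Spec_log_labels log_labels log_labels_alt
  have hm : PySem.Int.floordiv (size + 1) 2 = (size + 1) / 2 :=
    PySem.Int.floordiv_eq_ediv_of_pos (by norm_num)
  set mid := PySem.Int.floordiv (size + 1) 2 with hmdef
  have hmid : 2 * mid = size ∨ 2 * mid = size + 1 := by rw [hm]; omega
  by_cases hpos : 0 ≤ size
  · have hsz : ((size.toNat : Nat) : Int) = size := Int.toNat_of_nonneg hpos
    have hkey := log_labels_key size mid hmid size.toNat (by omega)
    rw [hsz] at hkey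
    refine hkey.trans ?_
    rw [show min size.toNat mid.toNat = mid.toNat by omega,
        show size.toNat - mid.toNat = (size - mid).toNat by omega]
  · rw [PySem.List.pyRange_one_eq_nil (by omega),
        show mid.toNat = 0 by omega, show (size - mid).toNat = 0 by omega]
    simp
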